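-- pv_equiv track=rewrite | github.com/ShamSinha/training_framework | seg_clf/src/datamodules/load_data/utils.py | get_bin_indices
-- ===== SOURCE A (Python) =====
-- import math
-- from typing import Any, Dict, List, Optional
--
-- def get_bin_indices(bins: List, data: List, return_edge: bool = True):
--     """
--     Given a bins ([10, 20, 30, 40]) and a list of datapoints [2, 3, 10, 15, 25]
--     returns a list of same length as the datapoints with the bin information
--     ([0,0,0,1,2])
--     Note: Max value of the data should not be greater than the max bin value and
--     Args:
--     -----
--     bins: all the bins
--     data: data as list
--     return_edge: if true returns the bin edge instead of index
--     """
--     bin_indices = []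
--     for item in data:
--         if item is None or math.isnan(item):
--             bin_indices.append(None)
--             continue
--         for i, bin_edge in enumerate(bins):
--             if item <= bin_edge:
--                 bin_indices.append(bin_edge if return_edge else i)
--                 break
--     return bin_indices
-- ===== SOURCE B (Python) =====
-- import math
--
-- def get_bin_indices(bins, data, return_edge=True):
--     # Precompute strict prefix maxima of bins: the only positions a first-fit
--     # scan can ever return; their values are strictly increasing, so each item
--     # is placed by binary search instead of a linear scan.
--     pm = []  # (edge, original index)
--     best = None
--     for i, e in enumerate(bins):
--         if best is None or e > best:
--             pm.append((e, i))
--             best = e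
--     vals = [p[0] for p in pm]
--     out = []
--     for item in data:
--         if item is None or math.isnan(item):
--             out.append(None)
--             continue
--         lo, hi = 0, len(vals)
--         while lo < hi:
--             mid = (lo + hi) // 2
--             if vals[mid] < item:
--                 lo = mid + 1
--             else:
--                 hi = mid
--         if lo < len(vals):
--             e, i = pm[lo]
--             out.append(e if return_edge else i)
--     return out
-- ===== Notes on version B (the rewrite author's own statement) =====
-- stated objective: faster
-- what changed: B precomputes the strict prefix maxima of bins once (the only positions a first-fit scan can return, strictly increasing in value) and places each datapoint by a hand-rolled bisect_left binary search over them, instead of A's linear scan of bins per datapoint.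
import Mathlib
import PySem

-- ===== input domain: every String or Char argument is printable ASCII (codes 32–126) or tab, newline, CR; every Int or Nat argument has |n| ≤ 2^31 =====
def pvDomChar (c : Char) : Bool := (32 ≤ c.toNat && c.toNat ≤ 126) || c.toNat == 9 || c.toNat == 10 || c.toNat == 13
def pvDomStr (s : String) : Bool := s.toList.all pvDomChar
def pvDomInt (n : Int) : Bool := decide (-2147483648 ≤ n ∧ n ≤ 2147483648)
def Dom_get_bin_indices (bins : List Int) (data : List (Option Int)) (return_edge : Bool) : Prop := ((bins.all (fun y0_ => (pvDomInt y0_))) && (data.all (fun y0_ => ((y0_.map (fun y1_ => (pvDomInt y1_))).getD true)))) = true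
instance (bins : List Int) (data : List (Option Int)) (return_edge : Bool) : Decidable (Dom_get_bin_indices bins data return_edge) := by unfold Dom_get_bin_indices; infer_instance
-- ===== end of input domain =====

-- B replaces A's per-item linear scan over bins by a binary search over the
-- strict prefix maxima of bins (objective: faster on large bin lists).

-- ===== PORT A =====
-- inner `for i, bin_edge in enumerate(bins): if item <= bin_edge: append(...); break`
def pvFindA (bins : List Int) (x : Int) (i : Int) (re : Bool) : Option Int :=
  match bins with
  | [] => none
  | e :: rest => if x ≤ e then some (if re then e else i) else pvFindA rest x (i + 1) re

def pvGoA (bins : List Int) (re : Bool) : List (Option Int) → List (Option Int)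
  | [] => []
  | none :: rest => none :: pvGoA bins re rest
  | some x :: rest =>
    match pvFindA bins x 0 re with
    | some v => some v :: pvGoA bins re rest
    | none => pvGoA bins re rest   -- no bin matched: A appends nothing

def get_bin_indices (bins : List Int) (data : List (Option Int)) (return_edge : Bool) : List (Option Int) :=
  pvGoA bins return_edge data

-- ===== PORT B =====
-- first loop of Source B: strict prefix maxima (edge, original index)
def pvPmGo (bins : List Int) (i : Int) (best : Option Int) : List (Int × Int) :=
  match bins with
  | [] => []
  | e :: rest =>
    if best.all (fun b => decide (b < e)) then (e, i) :: pvPmGo rest (i + 1) (some e)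
    else pvPmGo rest (i + 1) best

-- the hand-written `while lo < hi` bisect_left loop of Source B
def pvBsearch (vals : List Int) (x : Int) (lo hi : Nat) : Nat :=
  if lo < hi then
    let mid := (lo + hi) / 2
    if vals.getD mid 0 < x then pvBsearch vals x (mid + 1) hi else pvBsearch vals x lo mid
  else lo
termination_by hi - lo
decreasing_by all_goals omega

def pvGoB (pm : List (Int × Int)) (vals : List Int) (re : Bool) : List (Option Int) → List (Option Int)
  | [] => []
  | none :: rest => none :: pvGoB pm vals re rest
  | some x :: rest =>
    let lo := pvBsearch vals x 0 vals.length
    if lo < vals.length then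
      let p := pm.getD lo (0, 0)
      some (if re then p.1 else p.2) :: pvGoB pm vals re rest
    else pvGoB pm vals re rest

def get_bin_indices_alt (bins : List Int) (data : List (Option Int)) (return_edge : Bool) : List (Option Int) :=
  let pm := pvPmGo bins 0 none
  let vals := pm.map Prod.fst
  pvGoB pm vals return_edge data

-- ===== PRECONDITION & SPEC =====
def Spec_get_bin_indices (bins : List Int) (data : List (Option Int)) (return_edge : Bool) (out : List (Option Int)) : Prop := out = get_bin_indices_alt bins data return_edge
instance (bins : List Int) (data : List (Option Int)) (return_edge : Bool) (out : List (Option Int)) : Decidable (Spec_get_bin_indices bins data return_edge out) := by unfold Spec_get_bin_indices; infer_instance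

-- ===== CLAIM (what is proved, stated in full; the proofs are below) =====
def Claim_equal_get_bin_indices : Prop := ∀ (bins : List Int) (data : List (Option Int)) (return_edge : Bool), Dom_get_bin_indices bins data return_edge → Spec_get_bin_indices bins data return_edge (get_bin_indices bins data return_edge)

-- ===== LEMMAS AND PROOFS =====

-- proof-only helper: first (edge, index) pair of bins (from index i) with x ≤ edge
def pvFindFirst (bins : List Int) (x : Int) (i : Int) : Option (Int × Int) :=
  match bins with
  | [] => none
  | e :: rest => if x ≤ e then some (e, i) else pvFindFirst rest x (i + 1)

theorem findA_eq_findFirst (bins : List Int) (x : Int) (i : Int) (re : Bool) :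
    pvFindA bins x i re = (pvFindFirst bins x i).map (fun p => if re then p.1 else p.2) := by
  induction bins generalizing i with
  | nil => rfl
  | cons e rest ih =>
    simp only [pvFindA, pvFindFirst]
    split <;> simp [ih]

theorem find?_pmGo (bins : List Int) (x : Int) :
    ∀ (i : Int) (best : Option Int), (∀ b, best = some b → b < x) →
      (pvPmGo bins i best).find? (fun p => decide (x ≤ p.1)) = pvFindFirst bins x i := by
  induction bins with
  | nil => intro i best _; rfl
  | cons e rest ih =>
    intro i best hb
    simp only [pvPmGo]
    by_cases happ : best.all (fun b => decide (b < e)) = true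
    · rw [if_pos happ]
      by_cases hx : x ≤ e
      · rw [List.find?_cons_of_pos (by simpa using hx)]
        simp [pvFindFirst, hx]
      · rw [List.find?_cons_of_neg (by simpa using hx),
          ih (i + 1) (some e) (by intro b hb'; cases hb'; omega)]
        simp [pvFindFirst, hx]
    · rw [if_neg happ]
      cases best with
      | none => simp at happ
      | some b =>
        have hbx : b < x := hb b rfl
        have hbe' : ¬ b < e := by simpa using happ
        rw [ih (i + 1) (some b) hb]
        simp [pvFindFirst, show ¬ x ≤ e by omega]

theorem pmGo_lb (bins : List Int) :
    ∀ (i : Int) (best : Option Int) (p : Int × Int), p ∈ pvPmGo bins i best →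
      ∀ b, best = some b → b < p.1 := by
  induction bins with
  | nil => intro i best p hp; simp [pvPmGo] at hp
  | cons e rest ih =>
    intro i best p hp b hb
    subst hb
    simp only [pvPmGo] at hp
    by_cases happ : (some b).all (fun b => decide (b < e)) = true
    · rw [if_pos happ] at hp
      have hbe : b < e := by simpa using happ
      rcases List.mem_cons.mp hp with h | h
      · subst h; simpa using hbe
      · have := ih (i + 1) (some e) p h e rfl; omega
    · rw [if_neg happ] at hp
      exact ih (i + 1) (some b) p hp b rfl

theorem pmGo_sorted (bins : List Int) :
    ∀ (i : Int) (best : Option Int),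
      (pvPmGo bins i best).Pairwise (fun p q => p.1 < q.1) := by
  induction bins with
  | nil => intro i best; simp [pvPmGo]
  | cons e rest ih =>
    intro i best
    simp only [pvPmGo]
    split
    · exact List.pairwise_cons.mpr
        ⟨fun q hq => pmGo_lb rest (i + 1) (some e) q hq e rfl, ih (i + 1) (some e)⟩
    · exact ih (i + 1) best

theorem bsearch_spec (vals : List Int) (x : Int)
    (hs : vals.Pairwise (· < ·)) :
    ∀ (lo hi : Nat), lo ≤ hi → hi ≤ vals.length →
      (∀ k, k < lo → vals.getD k 0 < x) →
      (∀ k, hi ≤ k → k < vals.length → x ≤ vals.getD k 0) →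
      (∀ k, k < pvBsearch vals x lo hi → vals.getD k 0 < x) ∧
      (pvBsearch vals x lo hi < vals.length → x ≤ vals.getD (pvBsearch vals x lo hi) 0) ∧
      pvBsearch vals x lo hi ≤ vals.length := by
  have hmono : ∀ j k, j < k → k < vals.length → vals.getD j 0 < vals.getD k 0 := by
    intro j k hjk hk
    have hj : j < vals.length := lt_trans hjk hk
    rw [List.getD_eq_getElem vals 0 hj, List.getD_eq_getElem vals 0 hk]
    exact List.pairwise_iff_getElem.mp hs j k hj hk hjk
  intro lo hi
  induction lo, hi using pvBsearch.induct vals x with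
  | case1 lo hi hlt mid hv ih =>
    intro _ hhi hlo hhiv
    rw [pvBsearch, if_pos hlt]
    simp only [show (lo + hi) / 2 = mid from rfl, hv, if_pos]
    have hm2 : mid < hi := by omega
    refine ih (by omega) hhi ?_ hhiv
    intro k hk
    rcases Nat.lt_or_ge k mid with h | h
    · exact lt_trans (hmono k mid h (by omega)) hv
    · have : k = mid := by omega
      subst this; exact hv
  | case2 lo hi hlt mid hv ih =>
    intro hle hhi hlo hhiv
    rw [pvBsearch, if_pos hlt]
    simp only [show (lo + hi) / 2 = mid from rfl, hv]
    have hxm : x ≤ vals.getD mid 0 := le_of_not_gt (by simpa using hv)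
    refine ih (by omega) (by omega) hlo ?_
    intro k hk hkl
    rcases Nat.lt_or_ge mid k with h | h
    · exact le_of_lt (lt_of_le_of_lt hxm (hmono mid k h hkl))
    · have : k = mid := by omega
      subst this; exact hxm
  | case3 lo hi hlt =>
    intro hle hhi hlo hhiv
    rw [pvBsearch, if_neg hlt]
    have : lo = hi := by omega
    subst this
    exact ⟨hlo, fun h => hhiv lo (le_refl _) h, hhi⟩

theorem find?_of_spec (x : Int) :
    ∀ (pm : List (Int × Int)) (r : Nat),
      (∀ k, k < r → (pm.map Prod.fst).getD k 0 < x) →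
      (r < pm.length → x ≤ (pm.map Prod.fst).getD r 0) →
      r ≤ pm.length →
      pm.find? (fun p => decide (x ≤ p.1)) = pm[r]? := by
  intro pm
  induction pm with
  | nil =>
    intro r _ _ hr
    have : r = 0 := by simpa using hr
    subst this; rfl
  | cons p rest ih =>
    intro r h1 h2 h3
    cases r with
    | zero =>
      have hx : x ≤ p.1 := by simpa using h2 (by simp)
      rw [List.find?_cons_of_pos (by simpa using hx)]
      rfl
    | succ s =>
      have hp : p.1 < x := by simpa using h1 0 (by omega)
      rw [List.find?_cons_of_neg (by simp; omega)]
      have := ih s (fun k hk => by simpa using h1 (k + 1) (by omega))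
        (fun h => by simpa using h2 (by simpa using h)) (by simpa using h3)
      simpa using this

theorem item_eq (bins : List Int) (x : Int) (re : Bool) :
    (let pm := pvPmGo bins 0 none
     let vals := pm.map Prod.fst
     let lo := pvBsearch vals x 0 vals.length
     if lo < vals.length then some (if re then (pm.getD lo (0,0)).1 else (pm.getD lo (0,0)).2)
     else none) = pvFindA bins x 0 re := by
  simp only
  set pm := pvPmGo bins 0 none with hpm
  set vals := pm.map Prod.fst with hvals
  set lo := pvBsearch vals x 0 vals.length with hlo
  have hs : vals.Pairwise (· < ·) := by
    rw [hvals]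
    exact (List.pairwise_map).mpr (pmGo_sorted bins 0 none)
  have hspec := bsearch_spec vals x hs 0 vals.length (Nat.zero_le _) (le_refl _)
    (by omega) (by omega)
  rw [← hlo] at hspec
  have hlen : vals.length = pm.length := by simp [hvals]
  have hfind : pm.find? (fun p => decide (x ≤ p.1)) = pm[lo]? :=
    find?_of_spec x pm lo hspec.1 (by rw [← hlen]; exact hspec.2.1) (by rw [← hlen]; exact hspec.2.2)
  have hff : pm.find? (fun p => decide (x ≤ p.1)) = pvFindFirst bins x 0 :=
    find?_pmGo bins x 0 none (by intro b hb; cases hb)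
  rw [findA_eq_findFirst, ← hff, hfind]
  by_cases h : lo < vals.length
  · rw [if_pos h]
    have hlt : lo < pm.length := by omega
    rw [List.getElem?_eq_getElem hlt, List.getD_eq_getElem pm (0,0) hlt]
    rfl
  · rw [if_neg h]
    rw [List.getElem?_eq_none (by omega)]
    rfl

theorem goAB (bins : List Int) (re : Bool) (data : List (Option Int)) :
    pvGoA bins re data = pvGoB (pvPmGo bins 0 none) ((pvPmGo bins 0 none).map Prod.fst) re data := by
  induction data with
  | nil => rfl
  | cons d rest ih =>
    cases d with
    | none => simp only [pvGoA, pvGoB, ih]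
    | some x =>
      have h := item_eq bins x re
      simp only at h
      simp only [pvGoA, pvGoB, ih]
      rw [← h]
      split_ifs with hc <;> rfl

-- ===== VERDICT (by name: the statement is the Claim_ definition above) =====
theorem get_bin_indices_spec : Claim_equal_get_bin_indices := by
  intro bins data re _
  show get_bin_indices bins data re = get_bin_indices_alt bins data re
  simpa [get_bin_indices, get_bin_indices_alt] using goAB bins re data
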